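-- pv_equiv track=rewrite | github.com/ai-inventor-outputs/ai-invention-582cc7-circuit-motif-spectroscopy-discovering-u | evaluation_iter7_cross_verificat/src/eval.py | _nearest_qualifier
-- ===== SOURCE A (Python) =====
-- def _nearest_qualifier(before_text: str) -> str | None:
--     """Identify the nearest NMI/ARI qualifier from the text before the match.
--
--     Looks for the closest keyword in the immediate preceding text.
--     """
--     before = before_text.lower()
--     # Search from end (nearest to match) to start
--     qualifiers = {
--         "weighted": "weighted",
--         "motif-only": "weighted",
--         "motif only": "weighted",
--         "binary": "binary",
--         "baseline": "binary",
--         "combined": "combined",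
--         "all features": "combined",
--         "all_combined": "combined",
--         "graph stat": "graph_stats",
--         "graph-stat": "graph_stats",
--         "graph_stats": "graph_stats",
--         "residual": "residualized",
--         "normal": "domain_normalized",
--     }
--     best_pos = -1
--     best_qual = None
--     for keyword, qual in qualifiers.items():
--         pos = before.rfind(keyword)
--         if pos >= 0 and pos > best_pos:
--             best_pos = pos
--             best_qual = qual
--     return best_qual
-- ===== SOURCE B (Python) =====
-- def _nearest_qualifier(before_text: str) -> str | None:
--     """Identify the nearest NMI/ARI qualifier from the text before the match.
--
--     Scans positions from the end of the text backwards and returns the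
--     qualifier of the first keyword found to start at the current position.
--     """
--     before = before_text.lower()
--     qualifiers = {
--         "weighted": "weighted",
--         "motif-only": "weighted",
--         "motif only": "weighted",
--         "binary": "binary",
--         "baseline": "binary",
--         "combined": "combined",
--         "all features": "combined",
--         "all_combined": "combined",
--         "graph stat": "graph_stats",
--         "graph-stat": "graph_stats",
--         "graph_stats": "graph_stats",
--         "residual": "residualized",
--         "normal": "domain_normalized",
--     }
--     for i in range(len(before) - 1, -1, -1):
--         for keyword, qual in qualifiers.items():
--             if before.startswith(keyword, i):
--                 return qual
--     return None
-- ===== Notes on version B (the rewrite author's own statement) =====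
-- stated objective: alternative
-- what changed: Replaced the keyword-outer loop of rfind scans with a position-outer backward scan that returns the first keyword starting at the rightmost matching position.
import Mathlib
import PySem

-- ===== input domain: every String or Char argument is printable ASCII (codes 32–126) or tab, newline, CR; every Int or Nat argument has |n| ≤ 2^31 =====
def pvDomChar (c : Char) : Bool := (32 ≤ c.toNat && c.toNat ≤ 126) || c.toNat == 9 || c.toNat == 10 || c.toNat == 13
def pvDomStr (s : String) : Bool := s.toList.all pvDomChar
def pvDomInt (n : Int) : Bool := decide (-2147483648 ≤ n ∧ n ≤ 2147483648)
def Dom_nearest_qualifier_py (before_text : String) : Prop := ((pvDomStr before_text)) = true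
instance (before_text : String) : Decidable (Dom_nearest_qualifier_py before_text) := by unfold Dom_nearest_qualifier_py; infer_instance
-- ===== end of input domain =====

-- B replaces A's keyword-outer loop of rfind scans by a position-outer backward scan
-- returning on the first keyword starting at the rightmost matching position (alternative decomposition).

-- ===== PORT A =====
-- the dict literal (all keys distinct) as its items list in insertion order
def nqKeywords : List (String × String) :=
  [("weighted", "weighted"), ("motif-only", "weighted"), ("motif only", "weighted"),
   ("binary", "binary"), ("baseline", "binary"),
   ("combined", "combined"), ("all features", "combined"), ("all_combined", "combined"),
   ("graph stat", "graph_stats"), ("graph-stat", "graph_stats"), ("graph_stats", "graph_stats"),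
   ("residual", "residualized"), ("normal", "domain_normalized")]

-- the body of A's for-loop: pos = before.rfind(keyword); if pos >= 0 and pos > best_pos: update
def nqStep (before : String) (st : Int × Option String) (kq : String × String) : Int × Option String :=
  let pos := PySem.Str.rfind before kq.1
  if 0 ≤ pos ∧ st.1 < pos then (pos, some kq.2) else st

def nearest_qualifier_py (before_text : String) : Option String :=
  let before := PySem.Str.lower before_text
  (nqKeywords.foldl (nqStep before) (-1, none)).2

-- ===== PORT B =====
-- inner loop of B: first keyword whose lowercase text starts at position i (before.startswith(keyword, i))
def nqFindAt (before : List Char) (i : Nat) : List (String × String) → Option String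
  | [] => none
  | kq :: rest =>
      if PySem.Chars.startswith (before.drop i) kq.1.toList then some kq.2
      else nqFindAt before i rest

-- outer loop of B: for i in range(len(before) - 1, -1, -1), return on first hit
def nqScan (before : List Char) : Nat → Option String
  | 0 => none
  | j + 1 =>
      match nqFindAt before j nqKeywords with
      | some q => some q
      | none => nqScan before j

def nearest_qualifier_py_alt (before_text : String) : Option String :=
  let before := PySem.Chars.lower before_text.toList
  nqScan before before.length

-- ===== PRECONDITION & SPEC =====
def Spec_nearest_qualifier_py (before_text : String) (out : Option String) : Prop := out = nearest_qualifier_py_alt before_text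
instance (before_text : String) (out : Option String) : Decidable (Spec_nearest_qualifier_py before_text out) := by unfold Spec_nearest_qualifier_py; infer_instance

-- ===== CLAIM (what is proved, stated in full; the proofs are below) =====
def Claim_equal_nearest_qualifier_py : Prop := ∀ (before_text : String), Dom_nearest_qualifier_py before_text → Spec_nearest_qualifier_py before_text (nearest_qualifier_py before_text)

-- ===== LEMMAS AND PROOFS =====

-- rfind.go s sub j scans positions j, j-1, …, 0 and returns the highest match (or -1)
theorem nq_go_spec (s sub : List Char) : ∀ j : Nat,
    (PySem.Chars.rfind.go s sub j = -1 ∧ ∀ i ≤ j, sub.isPrefixOf (s.drop i) = false) ∨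
    (∃ m : Nat, PySem.Chars.rfind.go s sub j = (m : Int) ∧ m ≤ j ∧
      sub.isPrefixOf (s.drop m) = true ∧ ∀ i, m < i → i ≤ j → sub.isPrefixOf (s.drop i) = false) := by
  intro j
  induction j with
  | zero =>
      rw [PySem.Chars.rfind.go]
      by_cases h : sub.isPrefixOf s = true
      · right
        refine ⟨0, by simp [h], le_refl 0, by simpa using h, ?_⟩
        intro i hi hi'; omega
      · left
        refine ⟨by simp [h], ?_⟩
        intro i hi
        interval_cases i
        simpa using (Bool.eq_false_iff.mpr h)
  | succ j ih =>
      rw [PySem.Chars.rfind.go]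
      by_cases h : sub.isPrefixOf (s.drop (j + 1)) = true
      · right
        refine ⟨j + 1, by simp [h], le_refl _, h, ?_⟩
        intro i hi hi'; omega
      · rcases ih with ⟨he, hall⟩ | ⟨m, he, hm, hpre, hgr⟩
        · left
          refine ⟨by simp [h, he], ?_⟩
          intro i hi
          rcases Nat.lt_succ_iff_lt_or_eq.mp (Nat.lt_succ_of_le hi) with _ | rfl
          · exact hall i (by omega)
          · exact Bool.eq_false_iff.mpr h
        · right
          refine ⟨m, by simp [h, he], by omega, hpre, ?_⟩
          intro i hi hi'
          rcases Nat.lt_succ_iff_lt_or_eq.mp (Nat.lt_succ_of_le hi') with _ | rfl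
          · exact hgr i hi (by omega)
          · exact Bool.eq_false_iff.mpr h

theorem nq_findAt_eq_none (before : List Char) (i : Nat) :
    ∀ l : List (String × String),
      (∀ kq ∈ l, PySem.Chars.startswith (before.drop i) kq.1.toList = false) →
      nqFindAt before i l = none := by
  intro l
  induction l with
  | nil => intro _; rfl
  | cons kq rest ih =>
      intro h
      simp only [nqFindAt, h kq (by simp)]
      exact ih fun p hp => h p (by simp [hp])

theorem nq_findAt_ne_none (before : List Char) (i : Nat) :
    ∀ l : List (String × String),
      (∃ kq ∈ l, PySem.Chars.startswith (before.drop i) kq.1.toList = true) →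
      nqFindAt before i l ≠ none := by
  intro l
  induction l with
  | nil => rintro ⟨_, h, _⟩; simp at h
  | cons kq rest ih =>
      rintro ⟨p, hp, hs⟩
      simp only [nqFindAt]
      rcases List.mem_cons.mp hp with rfl | hp'
      · simp [hs]
      · by_cases hk : PySem.Chars.startswith (before.drop i) kq.1.toList = true
        · simp [hk]
        · simpa [hk] using ih ⟨p, hp', hs⟩

theorem nq_scan_none (before : List Char) : ∀ j : Nat,
    (∀ i < j, nqFindAt before i nqKeywords = none) → nqScan before j = none := by
  intro j
  induction j with
  | zero => intro _; rfl
  | succ j ih =>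
      intro h
      simp only [nqScan, h j (by omega)]
      exact ih fun i hi => h i (by omega)

theorem nq_scan_reach (before : List Char) (I : Nat)
    (hI : nqFindAt before I nqKeywords ≠ none) : ∀ j : Nat, I < j →
    (∀ i, I < i → i < j → nqFindAt before i nqKeywords = none) →
    nqScan before j = nqFindAt before I nqKeywords := by
  intro j
  induction j with
  | zero => intro h; omega
  | succ j ih =>
      intro hlt h
      by_cases hIj : I = j
      · subst hIj
        rcases Option.ne_none_iff_exists'.mp hI with ⟨q, hq⟩
        simp [nqScan, hq]
      · have hj : nqFindAt before j nqKeywords = none := h j (by omega) (by omega)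
        simp only [nqScan, hj]
        exact ih (by omega) fun i h1 h2 => h i h1 (by omega)

theorem nq_fold_const (b : String) : ∀ (l : List (String × String)) (p : Int) (q : Option String),
    (∀ kq ∈ l, PySem.Str.rfind b kq.1 ≤ p) → l.foldl (nqStep b) (p, q) = (p, q) := by
  intro l
  induction l with
  | nil => intro p q _; rfl
  | cons kq rest ih =>
      intro p q h
      have hle := h kq (by simp)
      simp only [List.foldl_cons, nqStep]
      rw [if_neg (by rintro ⟨_, h2⟩; omega)]
      exact ih p q fun p hp => h p (by simp [hp])

theorem nq_fold_main (b : String) (I : Nat) : ∀ (l : List (String × String)) (p : Int) (q : Option String),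
    p < (I : Int) →
    (∀ kq ∈ l, PySem.Str.rfind b kq.1 ≤ (I : Int)) →
    (∀ kq ∈ l, (PySem.Chars.startswith (b.toList.drop I) kq.1.toList = true ↔
        PySem.Str.rfind b kq.1 = (I : Int))) →
    (∃ kq ∈ l, PySem.Str.rfind b kq.1 = (I : Int)) →
    (l.foldl (nqStep b) (p, q)).2 = nqFindAt b.toList I l := by
  intro l
  induction l with
  | nil => rintro p q _ _ _ ⟨_, h, _⟩; simp at h
  | cons kq rest ih =>
      intro p q hp hle hiff hex
      by_cases hs : PySem.Chars.startswith (b.toList.drop I) kq.1.toList = true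
      · have hr : PySem.Str.rfind b kq.1 = (I : Int) := (hiff kq (by simp)).mp hs
        simp only [List.foldl_cons, nqStep, hr]
        rw [if_pos ⟨by omega, hp⟩]
        rw [nq_fold_const b rest (I : Int) (some kq.2)
              (fun p hp => hle p (by simp [hp]))]
        simp [nqFindAt, hs]
      · have hr : PySem.Str.rfind b kq.1 ≠ (I : Int) := fun h => hs ((hiff kq (by simp)).mpr h)
        have hlt : PySem.Str.rfind b kq.1 < (I : Int) :=
          lt_of_le_of_ne (hle kq (by simp)) hr
        have hex' : ∃ p ∈ rest, PySem.Str.rfind b p.1 = (I : Int) := by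
          rcases hex with ⟨p, hp, hpr⟩
          rcases List.mem_cons.mp hp with rfl | hp'
          · exact absurd hpr hr
          · exact ⟨p, hp', hpr⟩
        simp only [List.foldl_cons, nqStep, nqFindAt, hs]
        split
        · exact ih _ _ hlt (fun p hp => hle p (by simp [hp]))
            (fun p hp => hiff p (by simp [hp])) hex'
        · exact ih _ _ hp (fun p hp => hle p (by simp [hp]))
            (fun p hp => hiff p (by simp [hp])) hex'

theorem nq_keys_nonempty : ∀ kq ∈ nqKeywords, kq.1.toList ≠ [] := by decide

theorem nq_main (b : String) :
    (nqKeywords.foldl (nqStep b) (-1, none)).2 = nqScan b.toList b.toList.length := by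
  set L := b.toList with hL
  set n := L.length with hn
  have hrfind : ∀ kq : String × String,
      PySem.Str.rfind b kq.1 = PySem.Chars.rfind.go L kq.1.toList n := by
    intro kq
    rw [PySem.Str.rfind_eq, PySem.Chars.rfind]
  -- match at i = n is impossible (keywords are nonempty)
  have hnomatch_n : ∀ kq ∈ nqKeywords, kq.1.toList.isPrefixOf (L.drop n) = false := by
    intro kq hkq
    have : L.drop n = [] := by simp [hn]
    rw [this]
    cases hk : kq.1.toList with
    | nil => exact absurd hk (nq_keys_nonempty kq hkq)
    | cons c cs => rfl
  have hsw : ∀ (i : Nat) (kq : String × String),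
      PySem.Chars.startswith (L.drop i) kq.1.toList = true ↔
        kq.1.toList.isPrefixOf (L.drop i) = true := by
    intro i kq
    rw [PySem.Chars.startswith_iff, List.isPrefixOf_iff_prefix]
  by_cases hex : ∃ i, i ≤ n ∧
      (∃ kq ∈ nqKeywords, kq.1.toList.isPrefixOf (L.drop i) = true)
  · -- some keyword matches somewhere: both sides return the rightmost first hit
    classical
    set P : Nat → Prop := fun i => ∃ kq ∈ nqKeywords, kq.1.toList.isPrefixOf (L.drop i) = true with hP
    obtain ⟨i0, hi0, hPi0⟩ := hex
    set I := Nat.findGreatest P n with hI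
    have hPI : P I := Nat.findGreatest_spec hi0 hPi0
    have hgr : ∀ k, I < k → k ≤ n → ¬ P k := fun k h1 h2 => Nat.findGreatest_is_greatest h1 h2
    have hIle : I ≤ n := Nat.findGreatest_le n
    have hIlt : I < n := by
      rcases Nat.lt_or_ge I n with h | h
      · exact h
      · exfalso
        have : I = n := le_antisymm hIle h
        rcases hPI with ⟨kq, hkq, hpre⟩
        rw [this] at hpre
        exact absurd hpre (by simp [hnomatch_n kq hkq])
    -- (a) every rfind is ≤ I
    have hle : ∀ kq ∈ nqKeywords, PySem.Str.rfind b kq.1 ≤ (I : Int) := by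
      intro kq hkq
      rw [hrfind kq]
      rcases nq_go_spec L kq.1.toList n with ⟨he, _⟩ | ⟨m, he, hm, hpre, _⟩
      · rw [he]; omega
      · rw [he]
        by_contra hc
        have hmI : I < m := by exact_mod_cast by omega
        exact hgr m hmI hm ⟨kq, hkq, hpre⟩
    -- (b) matching at I is the same as rfind = I
    have hiff : ∀ kq ∈ nqKeywords,
        (PySem.Chars.startswith (L.drop I) kq.1.toList = true ↔
          PySem.Str.rfind b kq.1 = (I : Int)) := by
      intro kq hkq
      rw [hsw I kq, hrfind kq]
      constructor
      · intro hpreI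
        rcases nq_go_spec L kq.1.toList n with ⟨_, hall⟩ | ⟨m, he, hm, _, hgr'⟩
        · exact absurd hpreI (by simp [hall I hIle])
        · rw [he]
          have hIm : I ≤ m := by
            by_contra hc
            exact absurd hpreI (by simp [hgr' I (by omega) hIle])
          have hmI : (m : Int) ≤ (I : Int) := by
            have := hle kq hkq
            rw [hrfind kq, he] at this
            exact this
          have : m = I := by omega
          rw [this]
      · intro he'
        rcases nq_go_spec L kq.1.toList n with ⟨he, _⟩ | ⟨m, he, _, hpre, _⟩
        · rw [he] at he'; omega
        · rw [he] at he'
          have : m = I := by exact_mod_cast he'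
          rw [← this]; exact hpre
    -- (c) some keyword attains I
    have hex2 : ∃ kq ∈ nqKeywords, PySem.Str.rfind b kq.1 = (I : Int) := by
      rcases hPI with ⟨kq, hkq, hpre⟩
      exact ⟨kq, hkq, (hiff kq hkq).mp ((hsw I kq).mpr hpre)⟩
    rw [nq_fold_main b I nqKeywords (-1) none (by omega) hle hiff hex2]
    have hne : nqFindAt L I nqKeywords ≠ none := by
      rcases hPI with ⟨kq, hkq, hpre⟩
      exact nq_findAt_ne_none L I nqKeywords ⟨kq, hkq, (hsw I kq).mpr hpre⟩
    rw [nq_scan_reach L I hne n hIlt ?_]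
    intro i h1 h2
    apply nq_findAt_eq_none
    intro kq hkq
    by_contra hc
    have hs : PySem.Chars.startswith (L.drop i) kq.1.toList = true := by
      simpa using hc
    exact hgr i h1 (by omega) ⟨kq, hkq, (hsw i kq).mp hs⟩
  · -- no keyword matches anywhere: both sides return none
    have hnom : ∀ i ≤ n, ∀ kq ∈ nqKeywords, kq.1.toList.isPrefixOf (L.drop i) = false := by
      intro i hi kq hkq
      by_contra hc
      exact hex ⟨i, hi, kq, hkq, by simpa using hc⟩
    have hall : ∀ kq ∈ nqKeywords, PySem.Str.rfind b kq.1 ≤ (-1 : Int) := by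
      intro kq hkq
      rw [hrfind kq]
      rcases nq_go_spec L kq.1.toList n with ⟨he, _⟩ | ⟨m, he, hm, hpre, _⟩
      · rw [he]
      · exact absurd hpre (by simp [hnom m hm kq hkq])
    rw [nq_fold_const b nqKeywords (-1) none hall]
    rw [nq_scan_none L n ?_]
    intro i hi
    apply nq_findAt_eq_none
    intro kq hkq
    by_contra hc
    have hs : PySem.Chars.startswith (L.drop i) kq.1.toList = true := by simpa using hc
    exact absurd ((hsw i kq).mp hs) (by simp [hnom i (by omega) kq hkq])

-- ===== VERDICT (by name: the statement is the Claim_ definition above) =====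
theorem nearest_qualifier_py_spec : Claim_equal_nearest_qualifier_py := by
  intro before_text _
  unfold Spec_nearest_qualifier_py nearest_qualifier_py nearest_qualifier_py_alt
  have hb : (PySem.Str.lower before_text).toList = PySem.Chars.lower before_text.toList := by
    simp
  rw [nq_main (PySem.Str.lower before_text), hb]
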